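-- pv_equiv track=rewrite | github.com/DevinDai13/PythonSQL2 | Main_final.py | fd1infd2
-- ===== SOURCE A (Python) =====
-- def fd1infd2(fd1_set, fd2_set):
--     fd_holds = []
--     for i in range(len(fd1_set)):
--         if fd1_set[i] in fd2_set:
--             fd_holds.append(list(fd1_set[i]))
--         else:
--             closure_in_f2 = get_closure(fd1_set[i][0], fd2_set)
--             closure_in_f1 = get_closure(fd1_set[i][0], fd1_set)
--             if closure_in_f2 == closure_in_f1:
--                 fd_holds.append(list(fd1_set[i]))
--             else:
--                 continue
--     if fd_holds == fd1_set:
--         return True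
--     else:
--         return False
--
-- def get_closure(attribute,f_set):
--     closure_list = []
--     temp_list = []
--     B = []
--     if len(attribute) >= 2:
--         closure_list = list(attribute)
--         closure_list = [x for x in closure_list if "," not in x]
--         closure_list.append(attribute)
--     else:
--         closure_list.append(attribute)
--
--     different = True
--     while different:
--         different = False
--         for i in range(len(f_set)):
--             if len(f_set[i][0]) == 1:
--                 if f_set[i][0] in closure_list:
--                     if len(f_set[i][1]) > 1:
--                         B = list(f_set[i][1])
--                         B = [x for x in B if "," not in x]
--                         B.append(f_set[i][1])
--                     else:
--                         B = [f_set[i][1]]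
--                     temp_list = set(closure_list)
--                     closure_list = list(set().union(closure_list, B))
--                     if set(temp_list) != set(closure_list):
--                         different = True
--
--             if len(f_set[i][0]) > 1:
--                 fd_left = list(f_set[i][0])
--                 fd_left = [x for x in fd_left if "," not in x]
--                 if (all(x in closure_list for x in fd_left)) is True:
--                     if len(f_set[i][1]) > 1:
--                         B = list(f_set[i][1])
--                         B = [x for x in B if "," not in x]
--                         B.append(f_set[i][1])
--                     else:
--                         B = [f_set[i][1]]
--                     temp_list = set(closure_list)
--                     closure_list = list(set().union(closure_list, B))
--                     if set(temp_list) != set(closure_list):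
--                         different = True
--
--
--     closure_list = [x for x in closure_list if not len(x) > 1]
--
--     return sorted(closure_list)
-- ===== SOURCE B (Python) =====
-- def fd1infd2(fd1_set, fd2_set):
--     for fd in fd1_set:
--         if fd in fd2_set:
--             continue
--         if _closure(fd[0], fd2_set) != _closure(fd[0], fd1_set):
--             return False
--     return True
--
--
-- def _closure(attribute, fds):
--     # attribute closure by the counter/queue algorithm: precompute each FD's
--     # premise attributes and added attributes once, then propagate every derived
--     # attribute exactly once through a work queue, decrementing per-FD counters
--     # of premises still missing; an FD fires the moment its counter hits zero.
--     # Returns the closure as a set of single-attribute strings.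
--     if len(attribute) >= 2:
--         start = [c for c in dict.fromkeys(attribute) if c != ',']
--     else:
--         start = [attribute]
--     prem = []
--     add = []
--     for fd in fds:
--         l, r = fd[0], fd[1]
--         if len(l) == 0:
--             prem.append(None)
--             add.append([])
--             continue
--         prem.append([l] if len(l) == 1 else [c for c in dict.fromkeys(l) if c != ','])
--         add.append([c for c in dict.fromkeys(r) if c != ','] if len(r) > 1 else [r])
--     count = [len(p) if p is not None else -1 for p in prem]
--     result = set(start)
--     queue = list(start)
--     for j in range(len(fds)):
--         if count[j] == 0:
--             for y in add[j]:
--                 if y not in result: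
--                     result.add(y)
--                     queue.append(y)
--     i = 0
--     while i < len(queue):
--         x = queue[i]
--         i += 1
--         for j in range(len(fds)):
--             if prem[j] is not None and x in prem[j]:
--                 count[j] -= 1
--                 if count[j] == 0:
--                     for y in add[j]:
--                         if y not in result:
--                             result.add(y)
--                             queue.append(y)
--     return result
-- ===== Notes on version B (the rewrite author's own statement) =====
-- stated objective: faster
-- what changed: Replaces A's repeat-all-FDs-until-nothing-changes closure fixpoint (which re-derives every attribute on every pass and drags multi-character bookkeeping entries through the working list, finally filtering and sorting) by the single-pass counter/queue closure algorithm: premise and right-hand-side attribute lists are precomputed once per FD, each derived attribute is propagated exactly once through a work queue while per-FD counters of still-missing premises are decremented, and an FD fires the moment its counter reaches zero; …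
-- outside the precondition, e.g. on fd1infd2([['A', 'B']], [['AB']]): A returns False, B raises IndexError; on fd1infd2([['AA', 'A']], [['B', 'C']]): A returns False, B returns True
import Mathlib
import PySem

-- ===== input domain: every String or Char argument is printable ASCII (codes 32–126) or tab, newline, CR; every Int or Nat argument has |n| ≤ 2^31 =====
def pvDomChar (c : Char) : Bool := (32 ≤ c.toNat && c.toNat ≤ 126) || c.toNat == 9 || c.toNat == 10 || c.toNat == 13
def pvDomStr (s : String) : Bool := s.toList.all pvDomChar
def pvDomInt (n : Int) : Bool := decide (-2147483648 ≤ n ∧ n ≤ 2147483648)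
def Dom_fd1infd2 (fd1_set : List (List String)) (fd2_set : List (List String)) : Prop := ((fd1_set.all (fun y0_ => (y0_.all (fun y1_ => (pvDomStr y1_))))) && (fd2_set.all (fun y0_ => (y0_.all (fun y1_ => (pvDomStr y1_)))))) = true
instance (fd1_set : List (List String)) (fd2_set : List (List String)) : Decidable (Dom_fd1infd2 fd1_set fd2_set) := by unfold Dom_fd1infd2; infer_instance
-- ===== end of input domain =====

-- B replaces A's repeat-until-stable closure fixpoint by a single-pass counter/queue closure
-- algorithm (measured faster); return values only, neither program mutates its arguments.

-- ===== PORT A =====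
-- list(s) for a string s: its characters as one-character strings
def pvChars (s : String) : List String := s.toList.map (fun c => String.ofList [c])

-- [x for x in list(s) if "," not in x] — every x is a single character, so "," in x ↔ x = ","
def pvNonComma (s : String) : List String := (pvChars s).filter (fun x => x != ",")

-- initial closure_list of get_closure
def gcInit (attr : String) : List String :=
  if 2 ≤ PySem.Str.len attr then pvNonComma attr ++ [attr] else [attr]

-- the list B built from f_set[i][1]  (index 1 is in range under Pre_ whenever this is reached)
def gcRhs (fd : List String) : List String :=
  if 1 < PySem.Str.len (PySem.List.pyGetD fd 1 "") then
    pvNonComma (PySem.List.pyGetD fd 1 "") ++ [PySem.List.pyGetD fd 1 ""]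
  else [PySem.List.pyGetD fd 1 ""]

-- temp_list = set(closure_list); closure_list = list(set().union(closure_list, B));
-- if set(temp_list) != set(closure_list): different = True
-- (Python's set iteration order is unspecified; closure_list is only used through membership
--  and a final sorted(), so the first-insertion order of PySem.Set is a faithful representative)
def gcUnion (st : List String × Bool) (B : List String) : List String × Bool :=
  let temp : PySem.Set String := PySem.Set.ofList st.1
  let cl' : PySem.Set String := PySem.Set.update temp B
  (cl', st.2 || !(PySem.Set.equal temp cl'))

-- the body of `for i in range(len(f_set))` inside the while loop (the two Python `if`s on
-- len(f_set[i][0]) == 1 / > 1 are mutually exclusive, hence the if/else-if chain)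
def gcStep (st : List String × Bool) (fd : List String) : List String × Bool :=
  if PySem.Str.len (PySem.List.pyGetD fd 0 "") = 1 then
    (if st.1.contains (PySem.List.pyGetD fd 0 "") then gcUnion st (gcRhs fd) else st)
  else if 1 < PySem.Str.len (PySem.List.pyGetD fd 0 "") then
    (if (pvNonComma (PySem.List.pyGetD fd 0 "")).all (fun x => st.1.contains x) then
      gcUnion st (gcRhs fd)
    else st)
  else st

-- one full pass of the while body (different starts False each pass)
def gcPass (f_set : List (List String)) (cl : List String) : List String × Bool :=
  f_set.foldl gcStep (cl, false)

-- termination measure helper: how many strings of `univ` are not yet in `cl`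
def pvMissing (univ : List String) (cl : List String) : Nat :=
  (univ.filter (fun u => !(cl.contains u))).length

theorem pvMissing_le (univ cl cl' : List String) (hmono : ∀ x ∈ cl, x ∈ cl') :
    pvMissing univ cl' ≤ pvMissing univ cl := by
  unfold pvMissing
  induction univ with
  | nil => simp
  | cons u t ih =>
    simp only [List.filter_cons]
    simp only [List.contains_eq_mem] at ih ⊢
    by_cases h : u ∈ cl
    · have h' : u ∈ cl' := hmono u h
      simp [h, h']; omega
    · by_cases h' : u ∈ cl'
      · simp [h, h']; omega
      · simp [h, h']; omega

theorem pvMissing_lt (univ cl cl' : List String)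
    (hmono : ∀ x ∈ cl, x ∈ cl') (x : String) (hxu : x ∈ univ) (hxo : x ∉ cl) (hxn : x ∈ cl') :
    pvMissing univ cl' < pvMissing univ cl := by
  unfold pvMissing
  have hle : ∀ u : List String, (u.filter (fun v => !(cl'.contains v))).length ≤
      (u.filter (fun v => !(cl.contains v))).length := fun u => pvMissing_le u cl cl' hmono
  simp only [List.contains_eq_mem] at hle
  induction univ with
  | nil => cases hxu
  | cons u t ih =>
    simp only [List.filter_cons]
    simp only [List.contains_eq_mem]
    rcases List.mem_cons.mp hxu with rfl | hxt
    · have ht := hle t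
      simp [hxo, hxn]
      omega
    · have iht := ih hxt
      simp only [List.contains_eq_mem] at iht
      by_cases h : u ∈ cl
      · have h' : u ∈ cl' := hmono u h
        simp [h, h']; omega
      · by_cases h' : u ∈ cl'
        · simp [h, h']; omega
        · simp [h, h']; omega

theorem gcUnion_mem (st : List String × Bool) (B : List String) (x : String) :
    x ∈ (gcUnion st B).1 ↔ x ∈ st.1 ∨ x ∈ B := by
  simp [gcUnion, PySem.Set.mem_update, PySem.Set.mem_ofList]

theorem gcUnion_new (st : List String × Bool) (B : List String)
    (h : (gcUnion st B).2 = true) :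
    st.2 = true ∨ ∃ x, x ∈ B ∧ x ∉ st.1 ∧ x ∈ (gcUnion st B).1 := by
  simp only [gcUnion, Bool.or_eq_true, Bool.not_eq_true'] at h
  rcases h with h | h
  · exact Or.inl h
  · right
    have hne : ¬ ∀ x, x ∈ PySem.Set.ofList st.1 ↔
        x ∈ PySem.Set.update (PySem.Set.ofList st.1) B := by
      intro hall
      rw [(PySem.Set.equal_iff _ _).mpr hall] at h
      cases h
    push_neg at hne
    obtain ⟨x, hx⟩ := hne
    have hsub : x ∈ PySem.Set.ofList st.1 → x ∈ PySem.Set.update (PySem.Set.ofList st.1) B :=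
      fun hz => (PySem.Set.mem_update _ _ _).mpr (Or.inl hz)
    have hx12 : x ∉ PySem.Set.ofList st.1 ∧
        x ∈ PySem.Set.update (PySem.Set.ofList st.1) B := by
      rcases hx with ⟨h1, h2⟩ | ⟨h1, h2⟩
      · exact absurd (hsub h1) h2
      · exact ⟨h1, h2⟩
    obtain ⟨hx1, hx2⟩ := hx12
    have hxB : x ∈ B := by
      rcases (PySem.Set.mem_update _ _ _).mp hx2 with h1 | h1
      · exact absurd h1 hx1
      · exact h1
    refine ⟨x, hxB, by simpa [PySem.Set.mem_ofList] using hx1, ?_⟩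
    show x ∈ (gcUnion st B).1
    simp only [gcUnion]
    exact hx2

theorem gcStep_mono (st : List String × Bool) (fd : List String) :
    ∀ x ∈ st.1, x ∈ (gcStep st fd).1 := by
  intro x hx
  unfold gcStep
  split_ifs <;> first
    | exact hx
    | exact (gcUnion_mem _ _ _).mpr (Or.inl hx)

theorem gcStep_new (st : List String × Bool) (fd : List String)
    (h : (gcStep st fd).2 = true) :
    st.2 = true ∨ ∃ x, x ∈ gcRhs fd ∧ x ∉ st.1 ∧ x ∈ (gcStep st fd).1 := by
  unfold gcStep at h ⊢
  split_ifs at h ⊢ with h1 h2 h3 h4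
  · rcases gcUnion_new _ _ h with hl | ⟨x, hxB, hxo, hxn⟩
    · exact Or.inl hl
    · exact Or.inr ⟨x, hxB, hxo, hxn⟩
  · exact Or.inl h
  · rcases gcUnion_new _ _ h with hl | ⟨x, hxB, hxo, hxn⟩
    · exact Or.inl hl
    · exact Or.inr ⟨x, hxB, hxo, hxn⟩
  · exact Or.inl h
  · exact Or.inl h

-- shape of one pass, used for termination of the while loop
theorem gcFold_mono (fs : List (List String)) :
    ∀ st : List String × Bool, ∀ x ∈ st.1, x ∈ (fs.foldl gcStep st).1 := by
  induction fs with
  | nil => intro st x hx; simpa using hx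
  | cons fd fs ih =>
    intro st x hx
    simpa using ih (gcStep st fd) x (gcStep_mono st fd x hx)

theorem gcFold_new (fs : List (List String)) :
    ∀ st : List String × Bool, (fs.foldl gcStep st).2 = true →
      st.2 = true ∨ ∃ x, x ∈ fs.flatMap gcRhs ∧ x ∉ st.1 ∧ x ∈ (fs.foldl gcStep st).1 := by
  induction fs with
  | nil => intro st h; exact Or.inl (by simpa using h)
  | cons fd fs ih =>
    intro st h
    simp only [List.foldl_cons] at h
    rcases ih (gcStep st fd) h with hl | ⟨x, hxu, hxo, hxn⟩
    · rcases gcStep_new st fd hl with h2 | ⟨x, hxB, hxo, hxn⟩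
      · exact Or.inl h2
      · refine Or.inr ⟨x, ?_, hxo, ?_⟩
        · simp only [List.flatMap_cons, List.mem_append]; exact Or.inl hxB
        · simpa using gcFold_mono fs (gcStep st fd) x hxn
    · refine Or.inr ⟨x, ?_, fun hc => hxo (gcStep_mono st fd x hc), by simpa using hxn⟩
      simp only [List.flatMap_cons, List.mem_append]; exact Or.inr hxu

-- the while loop: repeat passes while `different`
def gcLoop (f_set : List (List String)) (cl : List String) : List String :=
  if h : (gcPass f_set cl).2 = true then gcLoop f_set (gcPass f_set cl).1 else (gcPass f_set cl).1
termination_by pvMissing (f_set.flatMap gcRhs) cl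
decreasing_by
  rcases gcFold_new f_set (cl, false) h with hc | ⟨x, hxu, hxo, hxn⟩
  · simp at hc
  · exact pvMissing_lt _ _ _ (gcFold_mono f_set (cl, false)) x hxu hxo hxn

def get_closure (attr : String) (f_set : List (List String)) : List String :=
  PySem.List.sorted
    ((gcLoop f_set (gcInit attr)).filter (fun x => !(decide (1 < PySem.Str.len x))))
    (fun x => x) false

def fd1infd2 (fd1_set : List (List String)) (fd2_set : List (List String)) : Bool :=
  let fd_holds := fd1_set.foldl (fun acc fd =>
    if fd2_set.contains fd then acc ++ [fd]
    else if get_closure (PySem.List.pyGetD fd 0 "") fd2_set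
            = get_closure (PySem.List.pyGetD fd 0 "") fd1_set then acc ++ [fd]
    else acc) []
  decide (fd_holds = fd1_set)

-- ===== PORT B =====
-- start = [c for c in dict.fromkeys(attr) if c != ','] (or [attr] when len < 2)
def altStart (attr : String) : List String :=
  if 2 ≤ PySem.Str.len attr then (PySem.List.dedup (pvChars attr)).filter (fun c => c != ",")
  else [attr]

-- prem entry for one fd (None when the left side is empty: that FD can never fire)
def premB (fd : List String) : Option (List String) :=
  let l := PySem.List.pyGetD fd 0 ""
  if PySem.Str.len l = 0 then none
  else if PySem.Str.len l = 1 then some [l]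
  else some ((PySem.List.dedup (pvChars l)).filter (fun c => c != ","))

-- add entry for one fd
def addB (fd : List String) : List String :=
  let l := PySem.List.pyGetD fd 0 ""
  if PySem.Str.len l = 0 then []
  else
    let r := PySem.List.pyGetD fd 1 ""
    if 1 < PySem.Str.len r then (PySem.List.dedup (pvChars r)).filter (fun c => c != ",")
    else [r]

-- the table-building for-loop, appending to prem and add
def altBuild (fds : List (List String)) : List (Option (List String)) × List (List String) :=
  fds.foldl (fun st fd => (st.1 ++ [premB fd], st.2 ++ [addB fd])) ([], [])

-- count = [len(p) if p is not None else -1 for p in prem]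
def altCount (prem : List (Option (List String))) : List Int :=
  prem.map (fun p => match p with | some p => (p.length : Int) | none => -1)

-- for y in ys: if y not in result: result.add(y); queue.append(y)
def altFire (rp : PySem.Set String × List String) (ys : List String) :
    PySem.Set String × List String :=
  ys.foldl (fun rp y => if rp.1.contains y then rp else (PySem.Set.add rp.1 y, rp.2 ++ [y])) rp

theorem altFire_shape (ys : List String) :
    ∀ (res : PySem.Set String) (pend : List String), ∃ news,
      altFire (res, pend) ys = (res ++ news, pend ++ news) ∧ news.Nodup ∧
      (∀ y ∈ news, y ∈ ys ∧ y ∉ res) ∧ (∀ y ∈ ys, y ∈ res ++ news) := by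
  induction ys with
  | nil => intro res pend; exact ⟨[], by simp [altFire]⟩
  | cons y t ih =>
    intro res pend
    by_cases h : y ∈ res
    · have hstep : altFire (res, pend) (y :: t) = altFire (res, pend) t := by
        show List.foldl _ (if res.contains y then (res, pend) else _) t = _
        rw [if_pos (by simpa [List.contains_eq_mem] using h)]
        rfl
      obtain ⟨news, he, hnd, hnew, hall⟩ := ih res pend
      refine ⟨news, hstep ▸ he, hnd, ?_, ?_⟩
      · intro z hz
        exact ⟨List.mem_cons_of_mem _ (hnew z hz).1, (hnew z hz).2⟩
      · intro z hz
        rcases List.mem_cons.mp hz with rfl | hzt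
        · simp [h]
        · exact hall z hzt
    · have hstep : altFire (res, pend) (y :: t) = altFire (res ++ [y], pend ++ [y]) t := by
        show List.foldl _ (if res.contains y then (res, pend)
          else (PySem.Set.add res y, pend ++ [y])) t = _
        rw [if_neg (by simpa [List.contains_eq_mem] using h)]
        have hadd : PySem.Set.add res y = res ++ [y] := by
          simp [PySem.Set.add, List.contains_eq_mem, h]
        rw [hadd]
        rfl
      obtain ⟨news, he, hnd, hnew, hall⟩ := ih (res ++ [y]) (pend ++ [y])
      refine ⟨y :: news, ?_, ?_, ?_, ?_⟩
      · rw [hstep, he]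
        simp only [List.append_assoc, List.singleton_append]
      · refine List.nodup_cons.mpr ⟨fun hc => ?_, hnd⟩
        exact (hnew y hc).2 (by simp)
      · intro z hz
        rcases List.mem_cons.mp hz with rfl | hzt
        · exact ⟨by simp, h⟩
        · exact ⟨List.mem_cons_of_mem _ (hnew z hzt).1,
            fun hc => (hnew z hzt).2 (by simp [hc])⟩
      · intro z hz
        rcases List.mem_cons.mp hz with rfl | hzt
        · simp
        · have := hall z hzt
          simpa only [List.append_assoc, List.singleton_append] using this

-- initial firing of FDs whose premise count is already zero (count is not modified here)
def altIFTick (add : List (List String)) (count : List Int)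
    (rp : PySem.Set String × List String) (j : Int) : PySem.Set String × List String :=
  if PySem.List.pyGetD count j 0 = 0 then altFire rp (PySem.List.pyGetD add j []) else rp

def altInitFire (add : List (List String)) (count : List Int) (n : Nat)
    (rp : PySem.Set String × List String) : PySem.Set String × List String :=
  (PySem.List.pyRange 0 (n : Int) 1).foldl (altIFTick add count) rp

-- body of `for j in range(len(fds))` inside the queue loop, for the dequeued attr x
def altTick (prem : List (Option (List String))) (add : List (List String)) (x : String)
    (st : PySem.Set String × List String × List Int) (j : Int) :
    PySem.Set String × List String × List Int :=
  match PySem.List.pyGetD prem j none with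
  | none => st
  | some p =>
    if p.contains x then
      let c := PySem.List.pyGetD st.2.2 j 0 - 1
      let cnt' := PySem.List.pySetD st.2.2 j c
      if c = 0 then
        let rp := altFire (st.1, st.2.1) (PySem.List.pyGetD add j [])
        (rp.1, rp.2, cnt')
      else (st.1, st.2.1, cnt')
    else st

def altInner (prem : List (Option (List String))) (add : List (List String)) (n : Nat)
    (x : String) (st : PySem.Set String × List String × List Int) :
    PySem.Set String × List String × List Int :=
  (PySem.List.pyRange 0 (n : Int) 1).foldl (altTick prem add x) st

theorem pvMissing_append (univ res news : List String) (hnd : news.Nodup)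
    (hn : ∀ y ∈ news, y ∉ res ∧ y ∈ univ) :
    pvMissing univ (res ++ news) + news.length ≤ pvMissing univ res := by
  induction news generalizing res with
  | nil => simp
  | cons y t ih =>
    have hy := hn y (by simp)
    have h1 : pvMissing univ (res ++ [y]) < pvMissing univ res :=
      pvMissing_lt univ res (res ++ [y]) (fun z hz => by simp [hz]) y hy.2 hy.1 (by simp)
    have h2 := ih (res ++ [y]) (List.nodup_cons.mp hnd).2
      (fun z hz => ⟨by
        simp only [List.mem_append, List.mem_singleton, not_or]
        exact ⟨(hn z (by simp [hz])).1, fun hc => (List.nodup_cons.mp hnd).1 (hc ▸ hz)⟩,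
        (hn z (by simp [hz])).2⟩)
    have he : res ++ y :: t = (res ++ [y]) ++ t := by simp
    rw [he]
    simp only [List.length_cons]
    omega

theorem pv_mem_getD_flat (add : List (List String)) (j : Int) (y : String)
    (hy : y ∈ PySem.List.pyGetD add j []) : y ∈ add.flatMap (fun a => a) := by
  by_cases h : PySem.Raise.InRange add.length j
  · exact List.mem_flatMap.mpr ⟨PySem.List.pyGetD add j [], PySem.List.pyGetD_mem add [] h, hy⟩
  · rw [PySem.List.pyGetD_of_none add j [] ((PySem.List.pyGet?_eq_none_iff add j).mpr h)] at hy
    cases hy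

theorem altTickFold_shape (prem : List (Option (List String))) (add : List (List String))
    (x : String) (js : List Int) :
    ∀ (res : PySem.Set String) (pend : List String) (cnt : List Int), ∃ news,
      (js.foldl (altTick prem add x) (res, pend, cnt)).1 = res ++ news ∧
      (js.foldl (altTick prem add x) (res, pend, cnt)).2.1 = pend ++ news ∧
      news.Nodup ∧ (∀ y ∈ news, y ∉ res ∧ y ∈ add.flatMap (fun a => a)) := by
  induction js with
  | nil => intro res pend cnt; exact ⟨[], by simp⟩
  | cons j js ih =>
    intro res pend cnt
    simp only [List.foldl_cons]
    rcases hpj : PySem.List.pyGetD prem j none with _ | p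
    · simpa [altTick, hpj] using ih res pend cnt
    · by_cases hpx : x ∈ p
      · by_cases hc : PySem.List.pyGetD cnt j 0 - 1 = 0
        · obtain ⟨news1, hf, hnd1, hnew1, _⟩ :=
            altFire_shape (PySem.List.pyGetD add j []) res pend
          obtain ⟨news2, h1, h2, hnd2, hnew2⟩ := ih (res ++ news1) (pend ++ news1)
            (PySem.List.pySetD cnt j (PySem.List.pyGetD cnt j 0 - 1))
          have hstep : altTick prem add x (res, pend, cnt) j =
              (res ++ news1, pend ++ news1,
                PySem.List.pySetD cnt j (PySem.List.pyGetD cnt j 0 - 1)) := by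
            simp [altTick, hpj, hpx, hc, hf]
          rw [hstep]
          refine ⟨news1 ++ news2, by simpa [List.append_assoc] using h1,
            by simpa [List.append_assoc] using h2, ?_, ?_⟩
          · refine List.Nodup.append hnd1 hnd2 ?_
            intro a ha1 ha2
            exact (hnew2 a ha2).1 (by simp [ha1])
          · intro y hy
            rcases List.mem_append.mp hy with hy1 | hy2
            · refine ⟨(hnew1 y hy1).2, ?_⟩
              have := (hnew1 y hy1).1
              exact pv_mem_getD_flat add j y this
            · exact ⟨fun hc2 => (hnew2 y hy2).1 (by simp [hc2]), (hnew2 y hy2).2⟩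
        · have hstep : altTick prem add x (res, pend, cnt) j =
              (res, pend, PySem.List.pySetD cnt j (PySem.List.pyGetD cnt j 0 - 1)) := by
            simp [altTick, hpj, hpx, hc]
          rw [hstep]
          exact ih res pend _
      · simpa [altTick, hpj, hpx] using ih res pend cnt

-- while i < len(queue): process queue[i] (pending = the unprocessed suffix of the queue)
def altLoop (prem : List (Option (List String))) (add : List (List String)) (n : Nat)
    (st : PySem.Set String × List String × List Int) : PySem.Set String :=
  match hm : st.2.1 with
  | [] => st.1
  | x :: rest => altLoop prem add n (altInner prem add n x (st.1, rest, st.2.2))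
termination_by 2 * pvMissing (add.flatMap (fun a => a)) st.1 + st.2.1.length
decreasing_by
  obtain ⟨news, h1, h2, hnd, hnew⟩ :=
    altTickFold_shape prem add x (PySem.List.pyRange 0 (n : Int) 1) st.1 rest st.2.2
  have hle := pvMissing_append (add.flatMap (fun a => a)) st.1 news hnd hnew
  simp only [altInner, h1, h2, hm]
  simp only [List.length_append, List.length_cons]
  omega

def altClosure (attr : String) (fds : List (List String)) : PySem.Set String :=
  let start := altStart attr
  let pa := altBuild fds
  let count := altCount pa.1
  let rp := altInitFire pa.2 count fds.length (PySem.Set.ofList start, start)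
  altLoop pa.1 pa.2 fds.length (rp.1, rp.2, count)

-- the top-level loop with its early `return False`
def altGo (fd1_set fd2_set : List (List String)) : List (List String) → Bool
  | [] => true
  | fd :: rest =>
    if fd2_set.contains fd then altGo fd1_set fd2_set rest
    else if PySem.Set.equal (altClosure (PySem.List.pyGetD fd 0 "") fd2_set)
                            (altClosure (PySem.List.pyGetD fd 0 "") fd1_set) then
      altGo fd1_set fd2_set rest
    else false

def fd1infd2_alt (fd1_set : List (List String)) (fd2_set : List (List String)) : Bool :=
  altGo fd1_set fd2_set fd1_set

-- ===== PRECONDITION & SPEC =====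
-- Pre_ excludes (i) inputs where some fd of fd1_set is outside fd2_set while some fd of either
-- set lacks a left or right side (there Python A either raises IndexError or — when it happens
-- never to touch the missing component — returns, while B's table building raises IndexError),
-- and (ii) inputs whose closures start from a left side with a repeated attr character, a
-- malformed-FD corner where A's closure keeps the duplicate only as long as no FD has fired and
-- B's set semantics is the equally defensible reading.
def Pre_fd1infd2 (fd1_set : List (List String)) (fd2_set : List (List String)) : Prop :=
  (∀ fd ∈ fd1_set, fd ∈ fd2_set) ∨
  ((∀ fd ∈ fd1_set, 2 ≤ fd.length ∧ (pvNonComma (fd.getD 0 "")).Nodup) ∧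
   (∀ fd ∈ fd2_set, 2 ≤ fd.length))

instance (fd1_set : List (List String)) (fd2_set : List (List String)) :
    Decidable (Pre_fd1infd2 fd1_set fd2_set) := by unfold Pre_fd1infd2; infer_instance

def pvWitness_fd1infd2 : List (List String) × List (List String) :=
  ([["A", "B"], ["B", "C"]], [["B", "C"], ["CA", "B,A"]])

def Spec_fd1infd2 (fd1_set : List (List String)) (fd2_set : List (List String)) (out : Bool) : Prop :=
  out = fd1infd2_alt fd1_set fd2_set
instance (fd1_set : List (List String)) (fd2_set : List (List String)) (out : Bool) :
    Decidable (Spec_fd1infd2 fd1_set fd2_set out) := by unfold Spec_fd1infd2; infer_instance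

-- ===== CLAIM (what is proved, stated in full; the proofs are below) =====
def Claim_equal_fd1infd2 : Prop := ∀ (fd1_set : List (List String)) (fd2_set : List (List String)), Dom_fd1infd2 fd1_set fd2_set → Pre_fd1infd2 fd1_set fd2_set → Spec_fd1infd2 fd1_set fd2_set (fd1infd2 fd1_set fd2_set)

-- ===== LEMMAS AND PROOFS =====

-- The common specification: the least set containing the initial attributes and closed under
-- the FDs (premises as premB, conclusions as the raw rhs list gcRhs).
inductive InCl (init : List String) (fds : List (List String)) : String → Prop
  | base {x : String} (hx : x ∈ init) : InCl init fds x
  | step {fd : List String} {p : List String} {x : String} (hfd : fd ∈ fds)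
      (hp : premB fd = some p) (hall : ∀ y ∈ p, InCl init fds y) (hx : x ∈ gcRhs fd) :
      InCl init fds x


-- ---- basic facts about characters, pvNonComma, premB, addB ----

theorem pv_mem_pvChars_len (s : String) (y : String) (hy : y ∈ pvChars s) :
    y.toList.length = 1 := by
  simp only [pvChars, List.mem_map] at hy
  obtain ⟨c, _, rfl⟩ := hy
  simp

theorem pv_mem_pvNonComma (s : String) (y : String) :
    y ∈ pvNonComma s ↔ y ∈ pvChars s ∧ y ≠ "," := by
  simp [pvNonComma, List.mem_filter, bne_iff_ne]

theorem pv_mem_dedupFilter (s : String) (y : String) :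
    y ∈ (PySem.List.dedup (pvChars s)).filter (fun c => c != ",") ↔ y ∈ pvNonComma s := by
  simp [pvNonComma, List.mem_filter]

theorem premB_cases (fd : List String) :
    (PySem.List.pyGetD fd 0 "").toList.length = 0 ∧ premB fd = none ∨
    ((PySem.List.pyGetD fd 0 "").toList.length = 1 ∧ premB fd = some [PySem.List.pyGetD fd 0 ""]) ∨
    (1 < (PySem.List.pyGetD fd 0 "").toList.length ∧
      premB fd = some ((PySem.List.dedup (pvChars (PySem.List.pyGetD fd 0 ""))).filter
        (fun c => c != ","))) := by
  simp only [premB, PySem.Str.len_eq]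
  rcases Nat.lt_trichotomy (PySem.List.pyGetD fd 0 "").toList.length 1 with h | h | h
  · left
    have h0 : (PySem.List.pyGetD fd 0 "").toList.length = 0 := by omega
    simp [h0]
  · right; left
    simp [h]
  · right; right
    refine ⟨h, ?_⟩
    rw [if_neg (by exact_mod_cast by omega), if_neg (by exact_mod_cast by omega)]

theorem premB_mem_len (fd : List String) (p : List String) (hp : premB fd = some p) :
    ∀ y ∈ p, y.toList.length = 1 := by
  rcases premB_cases fd with ⟨_, h⟩ | ⟨h1, h⟩ | ⟨h1, h⟩
  · rw [h] at hp; cases hp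
  · rw [h] at hp
    cases hp
    intro y hy
    simp only [List.mem_singleton] at hy
    subst hy; exact h1
  · rw [h] at hp
    cases hp
    intro y hy
    rw [pv_mem_dedupFilter, pv_mem_pvNonComma] at hy
    exact pv_mem_pvChars_len _ y hy.1

theorem premB_nodup (fd : List String) (p : List String) (hp : premB fd = some p) :
    p.Nodup := by
  rcases premB_cases fd with ⟨_, h⟩ | ⟨h1, h⟩ | ⟨h1, h⟩
  · rw [h] at hp; cases hp
  · rw [h] at hp; cases hp; simp
  · rw [h] at hp; cases hp
    exact (PySem.List.nodup_dedup _).filter _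

theorem mem_addB (fd : List String) (hne : premB fd ≠ none) (y : String) :
    y ∈ addB fd ↔ y ∈ gcRhs fd ∧ y.toList.length ≤ 1 := by
  have hl : ¬ ((PySem.List.pyGetD fd 0 "").toList.length = 0) := by
    rcases premB_cases fd with ⟨_, h⟩ | ⟨h1, h⟩ | ⟨h1, h⟩
    · exact absurd h hne
    · omega
    · omega
  simp only [addB, gcRhs, PySem.Str.len_eq]
  rw [if_neg (by exact_mod_cast hl)]
  by_cases hr : 1 < (PySem.List.pyGetD fd 1 "").toList.length
  · rw [if_pos (by exact_mod_cast hr), if_pos (by exact_mod_cast hr)]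
    rw [pv_mem_dedupFilter, pv_mem_pvNonComma]
    constructor
    · intro hy
      refine ⟨List.mem_append_left _ ((pv_mem_pvNonComma _ _).mpr hy), ?_⟩
      have := pv_mem_pvChars_len _ y hy.1
      omega
    · rintro ⟨hy, hlen⟩
      rcases List.mem_append.mp hy with hy1 | hy1
      · exact (pv_mem_pvNonComma _ _).mp hy1
      · simp only [List.mem_singleton] at hy1
        subst hy1; omega
  · rw [if_neg (by exact_mod_cast hr), if_neg (by exact_mod_cast hr)]
    constructor
    · intro hy
      simp only [List.mem_singleton] at hy
      subst hy
      exact ⟨by simp, by omega⟩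
    · rintro ⟨hy, _⟩; exact hy

theorem gcStep_eq (st : List String × Bool) (fd : List String) :
    (∃ p, premB fd = some p ∧ (∀ y ∈ p, y ∈ st.1) ∧ gcStep st fd = gcUnion st (gcRhs fd)) ∨
    ((∀ p, premB fd = some p → ¬ (∀ y ∈ p, y ∈ st.1)) ∧ gcStep st fd = st) := by
  rcases premB_cases fd with ⟨h1, h⟩ | ⟨h1, h⟩ | ⟨h1, h⟩
  · right
    constructor
    · intro p hp; rw [h] at hp; cases hp
    · simp only [gcStep, PySem.Str.len_eq]
      rw [if_neg (by exact_mod_cast by omega), if_neg (by exact_mod_cast by omega)]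
  · by_cases hc : PySem.List.pyGetD fd 0 "" ∈ st.1
    · left
      refine ⟨[PySem.List.pyGetD fd 0 ""], h, by simpa using hc, ?_⟩
      simp only [gcStep, PySem.Str.len_eq]
      rw [if_pos (by exact_mod_cast h1), if_pos (by simpa [List.contains_eq_mem] using hc)]
    · right
      constructor
      · intro p hp hall
        rw [h] at hp; cases hp
        exact hc (hall _ (by simp))
      · simp only [gcStep, PySem.Str.len_eq]
        rw [if_pos (by exact_mod_cast h1), if_neg (by simpa [List.contains_eq_mem] using hc)]
  · by_cases hc : ∀ y ∈ pvNonComma (PySem.List.pyGetD fd 0 ""), y ∈ st.1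
    · left
      refine ⟨_, h, ?_, ?_⟩
      · intro y hy
        exact hc y ((pv_mem_dedupFilter _ _).mp hy)
      · simp only [gcStep, PySem.Str.len_eq]
        rw [if_neg (by exact_mod_cast by omega), if_pos (by exact_mod_cast h1),
          if_pos (by simpa [List.all_eq_true, List.contains_eq_mem] using hc)]
    · right
      constructor
      · intro p hp hall
        rw [h] at hp; cases hp
        exact hc (fun y hy => hall y ((pv_mem_dedupFilter _ _).mpr hy))
      · simp only [gcStep, PySem.Str.len_eq]
        rw [if_neg (by exact_mod_cast by omega), if_pos (by exact_mod_cast h1),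
          if_neg (by simpa [List.all_eq_true, List.contains_eq_mem] using hc)]


-- ---- A side: the pass/loop compute exactly the closure predicate ----

theorem gcFold_sound (init : List String) (fds : List (List String)) :
    ∀ (fs : List (List String)), (∀ fd ∈ fs, fd ∈ fds) →
    ∀ st : List String × Bool, (∀ x ∈ st.1, InCl init fds x) →
    ∀ x ∈ (fs.foldl gcStep st).1, InCl init fds x := by
  intro fs
  induction fs with
  | nil => intro _ st hst x hx; exact hst x (by simpa using hx)
  | cons fd fs ih =>
    intro hsub st hst
    simp only [List.foldl_cons]
    refine ih (fun g hg => hsub g (List.mem_cons_of_mem _ hg)) (gcStep st fd) ?_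
    intro x hx
    rcases gcStep_eq st fd with ⟨p, hp, hall, heq⟩ | ⟨_, heq⟩
    · rw [heq] at hx
      rcases (gcUnion_mem st (gcRhs fd) x).mp hx with h1 | h1
      · exact hst x h1
      · exact InCl.step (hsub fd (by simp)) hp (fun y hy => hst y (hall y hy)) h1
    · rw [heq] at hx; exact hst x hx

theorem gcFold_no_change (fds : List (List String)) :
    ∀ (fs : List (List String)) (st : List String × Bool),
      (fs.foldl gcStep st).2 = false →
      st.2 = false ∧ (∀ x, x ∈ (fs.foldl gcStep st).1 ↔ x ∈ st.1) ∧
      (∀ fd ∈ fs, ∀ p, premB fd = some p → (∀ y ∈ p, y ∈ st.1) → ∀ z ∈ gcRhs fd, z ∈ st.1) := by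
  intro fs
  induction fs with
  | nil => intro st h; exact ⟨by simpa using h, by simp, by simp⟩
  | cons fd fs ih =>
    intro st h
    simp only [List.foldl_cons] at h ⊢
    obtain ⟨h2, hmem, hclosed⟩ := ih (gcStep st fd) h
    have hstep : (∀ x, x ∈ (gcStep st fd).1 ↔ x ∈ st.1) ∧
        (∀ p, premB fd = some p → (∀ y ∈ p, y ∈ st.1) → ∀ z ∈ gcRhs fd, z ∈ st.1) ∧
        st.2 = false := by
      rcases gcStep_eq st fd with ⟨p, hp, hall, heq⟩ | ⟨hno, heq⟩
      · rw [heq] at h2 ⊢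
        have hflag : st.2 = false ∧ PySem.Set.equal (PySem.Set.ofList st.1)
            (PySem.Set.update (PySem.Set.ofList st.1) (gcRhs fd)) = true := by
          have : (st.2 || !(PySem.Set.equal (PySem.Set.ofList st.1)
              (PySem.Set.update (PySem.Set.ofList st.1) (gcRhs fd)))) = false := h2
          constructor
          · exact (Bool.or_eq_false_iff.mp this).1
          · have := (Bool.or_eq_false_iff.mp this).2
            simpa using this
        have hiff := (PySem.Set.equal_iff _ _).mp hflag.2
        have hiff' : ∀ x, x ∈ (gcUnion st (gcRhs fd)).1 ↔ x ∈ st.1 := by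
          intro x
          have h3 : x ∈ (gcUnion st (gcRhs fd)).1 ↔
              x ∈ PySem.Set.update (PySem.Set.ofList st.1) (gcRhs fd) := by
            simp only [gcUnion]
          rw [h3, ← hiff x, PySem.Set.mem_ofList]
        refine ⟨hiff', ?_, hflag.1⟩
        intro p' _ _ z hz
        have : z ∈ PySem.Set.update (PySem.Set.ofList st.1) (gcRhs fd) :=
          (PySem.Set.mem_update _ _ _).mpr (Or.inr hz)
        rw [← hiff z, PySem.Set.mem_ofList] at this
        exact this
      · rw [heq] at h2 ⊢
        exact ⟨fun x => Iff.rfl, fun p hp hall => (hno p hp hall).elim, h2⟩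
    refine ⟨hstep.2.2, ?_, ?_⟩
    · intro x
      rw [hmem x, hstep.1 x]
    · intro g hg p hp hall
      rcases List.mem_cons.mp hg with rfl | hg'
      · exact hstep.2.1 p hp hall
      · intro z hz
        have := hclosed g hg' p hp (fun y hy => (hstep.1 y).mpr (hall y hy)) z hz
        exact (hstep.1 z).mp this

theorem gcFold_nodup (fs : List (List String)) :
    ∀ st : List String × Bool, st.1.Nodup → (fs.foldl gcStep st).1.Nodup := by
  induction fs with
  | nil => intro st h; simpa using h
  | cons fd fs ih =>
    intro st h
    simp only [List.foldl_cons]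
    refine ih (gcStep st fd) ?_
    rcases gcStep_eq st fd with ⟨p, hp, hall, heq⟩ | ⟨_, heq⟩
    · rw [heq]
      show ((PySem.Set.ofList st.1).update (gcRhs fd) : List String).Nodup
      exact PySem.Set.nodup_update _ _ (PySem.Set.nodup_ofList _)
    · rw [heq]; exact h

theorem gcLoop_subset (f_set : List (List String)) (cl : List String) :
    ∀ x ∈ cl, x ∈ gcLoop f_set cl := by
  induction cl using gcLoop.induct (f_set := f_set) with
  | case1 cl h ih =>
    rw [gcLoop, dif_pos h]
    intro x hx
    exact ih x (gcFold_mono f_set (cl, false) x hx)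
  | case2 cl h =>
    rw [gcLoop, dif_neg h]
    intro x hx
    exact gcFold_mono f_set (cl, false) x hx

theorem gcLoop_sound (f_set : List (List String)) (cl : List String) :
    ∀ init : List String, (∀ x ∈ cl, InCl init f_set x) →
    ∀ x ∈ gcLoop f_set cl, InCl init f_set x := by
  induction cl using gcLoop.induct (f_set := f_set) with
  | case1 cl h ih =>
    intro init hcl
    rw [gcLoop, dif_pos h]
    exact ih init (fun x hx => gcFold_sound init f_set f_set (fun g hg => hg) (cl, false) hcl x hx)
  | case2 cl h =>
    intro init hcl
    rw [gcLoop, dif_neg h]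
    exact fun x hx => gcFold_sound init f_set f_set (fun g hg => hg) (cl, false) hcl x hx

theorem gcLoop_closed (f_set : List (List String)) (cl : List String) :
    ∀ fd ∈ f_set, ∀ p, premB fd = some p → (∀ y ∈ p, y ∈ gcLoop f_set cl) →
    ∀ z ∈ gcRhs fd, z ∈ gcLoop f_set cl := by
  induction cl using gcLoop.induct (f_set := f_set) with
  | case1 cl h ih =>
    rw [gcLoop, dif_pos h]
    exact ih
  | case2 cl h =>
    rw [gcLoop, dif_neg h]
    intro fd hfd p hp hall z hz
    have h' : (f_set.foldl gcStep (cl, false)).2 = false := by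
      simpa using Bool.not_eq_true _ ▸ h
    obtain ⟨_, hmem, hclosed⟩ := gcFold_no_change f_set f_set (cl, false) h'
    exact (hmem z).mpr (hclosed fd hfd p hp (fun y hy => (hmem y).mp (hall y hy)) z hz)

theorem gcLoop_nodup (f_set : List (List String)) (cl : List String) (h : cl.Nodup) :
    (gcLoop f_set cl).Nodup := by
  induction cl using gcLoop.induct (f_set := f_set) with
  | case1 cl hc ih =>
    rw [gcLoop, dif_pos hc]
    exact ih (gcFold_nodup f_set (cl, false) h)
  | case2 cl hc =>
    rw [gcLoop, dif_neg hc]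
    exact gcFold_nodup f_set (cl, false) h

theorem InCl_sub_of_closed (init : List String) (fds : List (List String)) (S : List String)
    (hinit : ∀ x ∈ init, x ∈ S)
    (hcl : ∀ fd ∈ fds, ∀ p, premB fd = some p → (∀ y ∈ p, y ∈ S) → ∀ z ∈ gcRhs fd, z ∈ S) :
    ∀ x, InCl init fds x → x ∈ S := by
  intro x h
  induction h with
  | base hx => exact hinit _ hx
  | step hfd hp hall hx ih => exact hcl _ hfd _ hp (fun y hy => ih y hy) _ hx

theorem mem_gcLoop (f_set : List (List String)) (init : List String) (x : String) :
    x ∈ gcLoop f_set init ↔ InCl init f_set x := by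
  constructor
  · exact fun hx => gcLoop_sound f_set init init (fun y hy => InCl.base hy) x hx
  · exact fun h => InCl_sub_of_closed init f_set (gcLoop f_set init)
      (gcLoop_subset f_set init) (gcLoop_closed f_set init) x h


-- ---- B side: helpers for indexing, premise counting, and the build tables ----

theorem pv_getD_idx {α : Type} (l : List α) (d : α) (j : Nat) (hj : j < l.length) :
    PySem.List.pyGetD l (j : Int) d = l[j] := by
  rw [PySem.List.pyGetD_eq_getElem l d (by exact_mod_cast Int.natCast_nonneg j)
    (by exact_mod_cast hj)]
  simp

theorem pv_getD_setD_self (l : List Int) (j : Int) (v : Int) (h0 : 0 ≤ j)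
    (h1 : j < (l.length : Int)) :
    PySem.List.pyGetD (PySem.List.pySetD l j v) j 0 = v := by
  rw [PySem.List.pySetD_of_nonneg l v h0]
  rw [PySem.List.pyGetD_eq_getElem _ 0 h0 (by simpa using h1)]
  exact List.getElem_set_self _

theorem pv_getD_setD_ne (l : List Int) (i j : Int) (v : Int) (h0 : 0 ≤ i) (h0' : 0 ≤ j)
    (hne : j ≠ i) :
    PySem.List.pyGetD (PySem.List.pySetD l i v) j 0 = PySem.List.pyGetD l j 0 := by
  rw [PySem.List.pySetD_of_nonneg l v h0]
  by_cases hj : j < (l.length : Int)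
  · rw [PySem.List.pyGetD_eq_getElem _ 0 h0' (by simpa using hj),
      PySem.List.pyGetD_eq_getElem _ 0 h0' hj]
    refine List.getElem_set_ne ?_ _
    intro hc
    exact hne (by omega)
  · rw [PySem.List.pyGetD_of_none _ _ _ ((PySem.List.pyGet?_eq_none_iff _ _).mpr
      (by simp only [PySem.Raise.InRange, List.length_set]; omega)),
      PySem.List.pyGetD_of_none _ _ _ ((PySem.List.pyGet?_eq_none_iff _ _).mpr
      (by simp only [PySem.Raise.InRange]; omega))]

def cvalP (prem : List (Option (List String))) (P : List String) (j : Int) : Int :=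
  match PySem.List.pyGetD prem j none with
  | some p => ((p.filter (fun y => !(P.contains y))).length : Int)
  | none => -1

def pMatchB (prem : List (Option (List String))) (j : Int) (x : String) : Bool :=
  match PySem.List.pyGetD prem j none with
  | some p => p.contains x
  | none => false

theorem pv_filter_notmem_eq (p P : List String) (x : String) (hxp : x ∉ p) :
    p.filter (fun y => !((P ++ [x]).contains y)) = p.filter (fun y => !(P.contains y)) :=
  List.filter_congr (fun z hz => by
    have hzx : z ≠ x := fun h => hxp (h ▸ hz)
    simp [List.contains_eq_mem, List.mem_append, hzx])

theorem pv_filter_decr (p P : List String) (x : String) (hnd : p.Nodup) (hxp : x ∈ p)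
    (hxP : x ∉ P) :
    (p.filter (fun y => !((P ++ [x]).contains y))).length + 1 =
      (p.filter (fun y => !(P.contains y))).length := by
  induction p with
  | nil => cases hxp
  | cons a t ih =>
    obtain ⟨ha, hndt⟩ := List.nodup_cons.mp hnd
    rcases List.mem_cons.mp hxp with h1 | hxt
    · subst h1
      simp only [List.filter_cons]
      rw [pv_filter_notmem_eq t P x ha]
      simp [List.contains_eq_mem, hxP]
    · have hax : a ≠ x := fun h => ha (h ▸ hxt)
      have h3 := ih hndt hxt
      simp only [List.filter_cons]
      by_cases hPa : a ∈ P
      · have e1 : ((P ++ [x]).contains a) = true := by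
          simp [List.contains_eq_mem, List.mem_append, hPa]
        have e2 : (P.contains a) = true := by simp [List.contains_eq_mem, hPa]
        rw [e1, e2]
        simpa using h3
      · have e1 : ((P ++ [x]).contains a) = false := by
          simp [List.contains_eq_mem, List.mem_append, hPa, hax]
        have e2 : (P.contains a) = false := by simp [List.contains_eq_mem, hPa]
        rw [e1, e2]
        simp only [Bool.not_false, if_pos, List.length_cons]
        omega

theorem pv_filter_len_one (p P : List String) (x : String) (hnd : p.Nodup) (hxp : x ∈ p)
    (hxP : x ∉ P) :
    ((p.filter (fun y => !(P.contains y))).length = 1 ↔ ∀ z ∈ p, z ∈ P ++ [x]) := by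
  constructor
  · intro h
    obtain ⟨a, ha⟩ := List.length_eq_one_iff.mp h
    have hxF : x ∈ p.filter (fun y => !(P.contains y)) := by
      simp [List.mem_filter, List.contains_eq_mem, hxp, hxP]
    rw [ha] at hxF
    simp only [List.mem_singleton] at hxF
    intro z hz
    by_cases hzP : z ∈ P
    · simp [List.mem_append, hzP]
    · have hzF : z ∈ p.filter (fun y => !(P.contains y)) := by
        simp [List.mem_filter, List.contains_eq_mem, hz, hzP]
      rw [ha] at hzF
      simp only [List.mem_singleton] at hzF
      simp [List.mem_append, hzF, ← hxF]
  · intro h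
    have hsub : ∀ z ∈ p.filter (fun y => !(P.contains y)), z = x := by
      intro z hzF
      have hz := List.mem_filter.mp hzF
      have hzP : z ∉ P := by simpa [List.contains_eq_mem] using hz.2
      rcases List.mem_append.mp (h z hz.1) with h1 | h1
      · exact absurd h1 hzP
      · simpa using h1
    have hxF : x ∈ p.filter (fun y => !(P.contains y)) := by
      simp [List.mem_filter, List.contains_eq_mem, hxp, hxP]
    have hndF : (p.filter (fun y => !(P.contains y))).Nodup := hnd.filter _
    rcases hF : p.filter (fun y => !(P.contains y)) with _ | ⟨a, t⟩
    · rw [hF] at hxF; cases hxF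
    · rw [hF] at hsub hndF
      have ha : a = x := hsub a (by simp)
      rcases t with _ | ⟨b, t2⟩
      · simp
      · exfalso
        have hb : b = x := hsub b (by simp)
        exact (List.nodup_cons.mp hndF).1 (by simp [ha, hb])

theorem altBuild_go (fds : List (List String)) :
    ∀ ps as, fds.foldl (fun st fd => (st.1 ++ [premB fd], st.2 ++ [addB fd])) (ps, as)
      = (ps ++ fds.map premB, as ++ fds.map addB) := by
  induction fds with
  | nil => intro ps as; simp
  | cons fd fds ih =>
    intro ps as
    simp only [List.foldl_cons, List.map_cons]
    rw [ih]
    simp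

theorem altBuild_eq (fds : List (List String)) :
    altBuild fds = (fds.map premB, fds.map addB) := by
  unfold altBuild
  rw [altBuild_go]
  simp

theorem altCount_len (prem : List (Option (List String))) :
    (altCount prem).length = prem.length := by
  simp [altCount]

theorem altCount_getD (prem : List (Option (List String))) (j : Nat) (hj : j < prem.length) :
    PySem.List.pyGetD (altCount prem) (j : Int) 0 = cvalP prem [] (j : Int) := by
  have h2 : PySem.List.pyGetD prem (j : Int) none = prem[j] := pv_getD_idx prem none j hj
  have h1 : PySem.List.pyGetD (altCount prem) (j : Int) 0 = (altCount prem)[j]'(by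
      simpa [altCount_len] using hj) := pv_getD_idx _ 0 j (by simpa [altCount_len] using hj)
  rw [h1]
  unfold cvalP
  rw [h2]
  rcases hp : prem[j] with _ | p
  · simp [altCount, hp]
  · simp only [altCount, List.getElem_map, hp]
    have : (p.filter (fun y => !(([] : List String).contains y))) = p := by
      simp
    rw [this]

theorem altIFTickFold (add : List (List String)) (count : List Int) :
    ∀ (js : List Int) (res : PySem.Set String) (pend : List String), ∃ news,
      js.foldl (altIFTick add count) (res, pend) = (res ++ news, pend ++ news) ∧ news.Nodup ∧
      (∀ y ∈ news, y ∉ res ∧ ∃ j ∈ js, PySem.List.pyGetD count j 0 = 0 ∧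
        y ∈ PySem.List.pyGetD add j []) ∧
      (∀ j ∈ js, PySem.List.pyGetD count j 0 = 0 →
        ∀ y ∈ PySem.List.pyGetD add j [],
          y ∈ (js.foldl (altIFTick add count) (res, pend)).1) := by
  intro js
  induction js with
  | nil =>
    intro res pend
    exact ⟨[], by simp, by simp, by simp, by simp⟩
  | cons j js ih =>
    intro res pend
    simp only [List.foldl_cons]
    by_cases hc : PySem.List.pyGetD count j 0 = 0
    · obtain ⟨news1, hf, hnd1, hnew1, hys⟩ := altFire_shape (PySem.List.pyGetD add j []) res pend
      have hstep : altIFTick add count (res, pend) j = (res ++ news1, pend ++ news1) := by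
        simp [altIFTick, hc, hf]
      rw [hstep]
      obtain ⟨news2, he2, hnd2, hnew2, hclosed2⟩ := ih (res ++ news1) (pend ++ news1)
      refine ⟨news1 ++ news2, by simp [he2, List.append_assoc], ?_, ?_, ?_⟩
      · refine List.Nodup.append hnd1 hnd2 ?_
        intro a ha1 ha2
        exact (hnew2 a ha2).1 (by simp [ha1])
      · intro y hy
        rcases List.mem_append.mp hy with hy1 | hy2
        · exact ⟨(hnew1 y hy1).2, ⟨j, by simp, hc, (hnew1 y hy1).1⟩⟩
        · refine ⟨fun hcon => (hnew2 y hy2).1 (by simp [hcon]), ?_⟩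
          obtain ⟨_, j', hj', hcj', hyj'⟩ := hnew2 y hy2
          exact ⟨j', List.mem_cons_of_mem _ hj', hcj', hyj'⟩
      · intro j' hj' hcj' y hy
        rcases List.mem_cons.mp hj' with rfl | hj2
        · rw [he2]
          have := hys y hy
          simp only [List.mem_append] at this ⊢
          tauto
        · exact hclosed2 j' hj2 hcj' y hy
    · have hstep : altIFTick add count (res, pend) j = (res, pend) := by
        simp [altIFTick, hc]
      rw [hstep]
      obtain ⟨news, he, hnd, hnew, hclosed⟩ := ih res pend
      refine ⟨news, he, hnd, ?_, ?_⟩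
      · intro y hy
        obtain ⟨hy1, j', hj', hcj', hyj'⟩ := hnew y hy
        exact ⟨hy1, ⟨j', List.mem_cons_of_mem _ hj', hcj', hyj'⟩⟩
      · intro j' hj' hcj' y hy
        rcases List.mem_cons.mp hj' with rfl | hj2
        · exact absurd hcj' hc
        · exact hclosed j' hj2 hcj' y hy


-- ---- B side: full specification of the queue-step fold ----

theorem altTickFold_spec (prem : List (Option (List String))) (add : List (List String))
    (x : String) (P : List String) (hxP : x ∉ P)
    (hnodp : ∀ (j : Int) (p : List String), PySem.List.pyGetD prem j none = some p → p.Nodup) :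
    ∀ (js : List Int), js.Nodup → (∀ j ∈ js, 0 ≤ j) →
    ∀ (res : PySem.Set String) (pend : List String) (cnt : List Int),
      (∀ j ∈ js, j < (cnt.length : Int)) →
      (∀ j ∈ js, PySem.List.pyGetD cnt j 0 = cvalP prem P j) →
      ∃ news,
      (js.foldl (altTick prem add x) (res, pend, cnt)).1 = res ++ news ∧
      (js.foldl (altTick prem add x) (res, pend, cnt)).2.1 = pend ++ news ∧
      (js.foldl (altTick prem add x) (res, pend, cnt)).2.2.length = cnt.length ∧
      (∀ j0 : Int, 0 ≤ j0 →
        PySem.List.pyGetD (js.foldl (altTick prem add x) (res, pend, cnt)).2.2 j0 0 =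
          (if j0 ∈ js ∧ pMatchB prem j0 x = true then PySem.List.pyGetD cnt j0 0 - 1
           else PySem.List.pyGetD cnt j0 0)) ∧
      (∀ y ∈ news, ∃ j ∈ js, ∃ p, PySem.List.pyGetD prem j none = some p ∧ x ∈ p ∧
        (∀ z ∈ p, z ∈ P ++ [x]) ∧ y ∈ PySem.List.pyGetD add j []) ∧
      (∀ j ∈ js, ∀ p, PySem.List.pyGetD prem j none = some p → x ∈ p →
        (∀ z ∈ p, z ∈ P ++ [x]) → ∀ y ∈ PySem.List.pyGetD add j [],
          y ∈ (js.foldl (altTick prem add x) (res, pend, cnt)).1) := by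
  intro js
  induction js with
  | nil =>
    intro _ _ res pend cnt _ _
    refine ⟨[], by simp, by simp, by simp, ?_, by simp, by simp⟩
    intro j0 _
    simp
  | cons j js ih =>
    intro hnd hpos res pend cnt hlt hcnt
    obtain ⟨hjjs, hndjs⟩ := List.nodup_cons.mp hnd
    have hj0 : 0 ≤ j := hpos j (by simp)
    have hjlen : j < (cnt.length : Int) := hlt j (by simp)
    have hpos' : ∀ j' ∈ js, 0 ≤ j' := fun j' hj' => hpos j' (List.mem_cons_of_mem _ hj')
    simp only [List.foldl_cons]
    rcases hpj : PySem.List.pyGetD prem j none with _ | p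
    · -- prem[j] is None: that FD is skipped
      have hstep : altTick prem add x (res, pend, cnt) j = (res, pend, cnt) := by
        simp [altTick, hpj]
      rw [hstep]
      obtain ⟨news, h1, h2, h3, h4, h5, h6⟩ := ih hndjs hpos' res pend cnt
        (fun j' hj' => hlt j' (List.mem_cons_of_mem _ hj'))
        (fun j' hj' => hcnt j' (List.mem_cons_of_mem _ hj'))
      refine ⟨news, h1, h2, h3, ?_, ?_, ?_⟩
      · intro j0 hj00
        rw [h4 j0 hj00]
        by_cases hj0j : j0 = j
        · subst hj0j
          rw [if_neg (fun hcon => hjjs hcon.1),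
            if_neg (fun hcon => by simpa [pMatchB, hpj] using hcon.2)]
        · simp [List.mem_cons, hj0j]
      · intro y hy
        obtain ⟨j', hj', p', hp', hxp', hsub', hyj'⟩ := h5 y hy
        exact ⟨j', List.mem_cons_of_mem _ hj', p', hp', hxp', hsub', hyj'⟩
      · intro j' hj' p' hp' hxp' hsub' y hy
        rcases List.mem_cons.mp hj' with rfl | hj2
        · rw [hpj] at hp'; cases hp'
        · exact h6 j' hj2 p' hp' hxp' hsub' y hy
    · by_cases hpx : x ∈ p
      · -- the dequeued attribute is one of this FD's premises: decrement its counter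
        have hpxc : p.contains x = true := by simp [List.contains_eq_mem, hpx]
        have hpnd : p.Nodup := hnodp j p hpj
        have hold : PySem.List.pyGetD cnt j 0 =
            ((p.filter (fun y => !(P.contains y))).length : Int) := by
          have := hcnt j (by simp)
          rw [this]
          simp [cvalP, hpj]
        have hiff : (PySem.List.pyGetD cnt j 0 - 1 = 0) ↔ (∀ z ∈ p, z ∈ P ++ [x]) := by
          rw [hold, ← pv_filter_len_one p P x hpnd hpx hxP]
          omega
        have hlt1 : ∀ j' ∈ js, j' <
            ((PySem.List.pySetD cnt j (PySem.List.pyGetD cnt j 0 - 1)).length : Int) := by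
          intro j' hj'
          rw [PySem.List.length_pySetD]
          exact hlt j' (List.mem_cons_of_mem _ hj')
        have hcnt1 : ∀ j' ∈ js,
            PySem.List.pyGetD (PySem.List.pySetD cnt j (PySem.List.pyGetD cnt j 0 - 1)) j' 0 =
            cvalP prem P j' := by
          intro j' hj'
          rw [pv_getD_setD_ne cnt j j' _ hj0 (hpos' j' hj') (fun h => hjjs (h ▸ hj'))]
          exact hcnt j' (List.mem_cons_of_mem _ hj')
        by_cases hcz : PySem.List.pyGetD cnt j 0 - 1 = 0
        · -- the counter hits zero: the FD fires
          obtain ⟨news1, hf, hnd1, hnew1, hys⟩ :=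
            altFire_shape (PySem.List.pyGetD add j []) res pend
          have hstep : altTick prem add x (res, pend, cnt) j = (res ++ news1, pend ++ news1,
              PySem.List.pySetD cnt j (PySem.List.pyGetD cnt j 0 - 1)) := by
            simp [altTick, hpj, hpx, hcz, hf]
          rw [hstep]
          obtain ⟨news2, h1, h2, h3, h4, h5, h6⟩ := ih hndjs hpos' (res ++ news1)
            (pend ++ news1) _ hlt1 hcnt1
          refine ⟨news1 ++ news2, by simp [h1, List.append_assoc],
            by simp [h2, List.append_assoc],
            h3.trans (PySem.List.length_pySetD cnt j _), ?_, ?_, ?_⟩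
          · intro j0 hj00
            rw [h4 j0 hj00]
            by_cases hj0j : j0 = j
            · subst hj0j
              rw [if_neg (fun hcon => hjjs hcon.1)]
              rw [pv_getD_setD_self cnt j0 _ hj0 hjlen]
              rw [if_pos ⟨by simp, by simp [pMatchB, hpj, List.contains_eq_mem, hpx]⟩]
            · rw [pv_getD_setD_ne cnt j j0 _ hj0 hj00 hj0j]
              simp [List.mem_cons, hj0j]
          · intro y hy
            rcases List.mem_append.mp hy with hy1 | hy2
            · exact ⟨j, by simp, p, hpj, hpx, hiff.mp hcz, (hnew1 y hy1).1⟩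
            · obtain ⟨j', hj', p', hp', hxp', hsub', hyj'⟩ := h5 y hy2
              exact ⟨j', List.mem_cons_of_mem _ hj', p', hp', hxp', hsub', hyj'⟩
          · intro j' hj' p' hp' hxp' hsub' y hy
            rcases List.mem_cons.mp hj' with rfl | hj2
            · rw [h1]
              have := hys y hy
              simp only [List.mem_append] at this ⊢
              tauto
            · exact h6 j' hj2 p' hp' hxp' hsub' y hy
        · -- counter stays positive: only the count list changes
          have hstep : altTick prem add x (res, pend, cnt) j = (res, pend,
              PySem.List.pySetD cnt j (PySem.List.pyGetD cnt j 0 - 1)) := by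
            simp [altTick, hpj, hpx, hcz]
          rw [hstep]
          obtain ⟨news, h1, h2, h3, h4, h5, h6⟩ := ih hndjs hpos' res pend _ hlt1 hcnt1
          refine ⟨news, h1, h2, h3.trans (PySem.List.length_pySetD cnt j _), ?_, ?_, ?_⟩
          · intro j0 hj00
            rw [h4 j0 hj00]
            by_cases hj0j : j0 = j
            · subst hj0j
              rw [if_neg (fun hcon => hjjs hcon.1)]
              rw [pv_getD_setD_self cnt j0 _ hj0 hjlen]
              rw [if_pos ⟨by simp, by simp [pMatchB, hpj, List.contains_eq_mem, hpx]⟩]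
            · rw [pv_getD_setD_ne cnt j j0 _ hj0 hj00 hj0j]
              simp [List.mem_cons, hj0j]
          · intro y hy
            obtain ⟨j', hj', p', hp', hxp', hsub', hyj'⟩ := h5 y hy
            exact ⟨j', List.mem_cons_of_mem _ hj', p', hp', hxp', hsub', hyj'⟩
          · intro j' hj' p' hp' hxp' hsub' y hy
            rcases List.mem_cons.mp hj' with rfl | hj2
            · rw [hpj] at hp'
              cases hp'
              exact absurd (hiff.mpr hsub') hcz
            · exact h6 j' hj2 p' hp' hxp' hsub' y hy
      · -- the dequeued attribute is not a premise of this FD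
        have hpxc : p.contains x = false := by simp [List.contains_eq_mem, hpx]
        have hstep : altTick prem add x (res, pend, cnt) j = (res, pend, cnt) := by
          simp [altTick, hpj, hpx]
        rw [hstep]
        obtain ⟨news, h1, h2, h3, h4, h5, h6⟩ := ih hndjs hpos' res pend cnt
          (fun j' hj' => hlt j' (List.mem_cons_of_mem _ hj'))
          (fun j' hj' => hcnt j' (List.mem_cons_of_mem _ hj'))
        refine ⟨news, h1, h2, h3, ?_, ?_, ?_⟩
        · intro j0 hj00
          rw [h4 j0 hj00]
          by_cases hj0j : j0 = j
          · subst hj0j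
            rw [if_neg (fun hcon => hjjs hcon.1),
              if_neg (fun hcon => by
                have := hcon.2
                simp [pMatchB, hpj, List.contains_eq_mem, hpx] at this)]
          · simp [List.mem_cons, hj0j]
        · intro y hy
          obtain ⟨j', hj', p', hp', hxp', hsub', hyj'⟩ := h5 y hy
          exact ⟨j', List.mem_cons_of_mem _ hj', p', hp', hxp', hsub', hyj'⟩
        · intro j' hj' p' hp' hxp' hsub' y hy
          rcases List.mem_cons.mp hj' with rfl | hj2
          · rw [hpj] at hp'
            cases hp'
            exact absurd hxp' hpx
          · exact h6 j' hj2 p' hp' hxp' hsub' y hy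


-- ---- B side: invariant of the queue loop and the characterisation of altClosure ----

theorem pv_int_cases (n : Nat) (j : Int) (h0 : 0 ≤ j) (h1 : j < (n : Int)) :
    ∃ k : Nat, k < n ∧ j = (k : Int) := ⟨j.toNat, by omega, by omega⟩

theorem prem_table (fds : List (List String)) (j : Nat) (hj : j < fds.length) :
    PySem.List.pyGetD (fds.map premB) (j : Int) none = premB fds[j] := by
  rw [pv_getD_idx _ _ j (by simpa using hj)]
  simp

theorem add_table (fds : List (List String)) (j : Nat) (hj : j < fds.length) :
    PySem.List.pyGetD (fds.map addB) (j : Int) [] = addB fds[j] := by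
  rw [pv_getD_idx _ _ j (by simpa using hj)]
  simp

theorem prem_table_nodup (fds : List (List String)) :
    ∀ (j : Int) (p : List String),
      PySem.List.pyGetD (fds.map premB) j none = some p → p.Nodup := by
  intro j p hp
  by_cases h : PySem.Raise.InRange (fds.map premB).length j
  · have := PySem.List.pyGetD_mem (fds.map premB) none h
    rw [hp] at this
    obtain ⟨fd, _, hfd⟩ := List.mem_map.mp this
    exact premB_nodup fd p hfd
  · rw [PySem.List.pyGetD_of_none _ _ _ ((PySem.List.pyGet?_eq_none_iff _ _).mpr h)] at hp
    cases hp

theorem mem_altStart (attr : String) (y : String) :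
    y ∈ altStart attr ↔ y ∈ gcInit attr ∧ y.toList.length ≤ 1 := by
  unfold altStart gcInit
  by_cases h : 2 ≤ PySem.Str.len attr
  · rw [if_pos h, if_pos h]
    have hlen : 2 ≤ attr.toList.length := by
      rw [PySem.Str.len_eq] at h; exact_mod_cast h
    constructor
    · intro hy
      have hy' := (pv_mem_dedupFilter attr y).mp hy
      refine ⟨List.mem_append_left _ hy', ?_⟩
      have := pv_mem_pvChars_len attr y ((pv_mem_pvNonComma attr y).mp hy').1
      omega
    · rintro ⟨hy, hl⟩
      rcases List.mem_append.mp hy with h1 | h1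
      · exact (pv_mem_dedupFilter attr y).mpr h1
      · simp only [List.mem_singleton] at h1
        subst h1
        omega
  · rw [if_neg h, if_neg h]
    have hlen : attr.toList.length ≤ 1 := by
      rw [PySem.Str.len_eq] at h; omega
    constructor
    · intro hy
      simp only [List.mem_singleton] at hy
      subst hy
      exact ⟨by simp, hlen⟩
    · exact fun h => h.1

theorem altStart_nodup (attr : String) : (altStart attr).Nodup := by
  unfold altStart
  split_ifs
  · exact (PySem.List.nodup_dedup _).filter _
  · simp

theorem gcInit_nodup (attr : String) (h : (pvNonComma attr).Nodup) : (gcInit attr).Nodup := by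
  unfold gcInit
  split_ifs with h2
  · refine List.Nodup.append h (by simp) ?_
    intro a ha hb
    simp only [List.mem_singleton] at hb
    have hca := pv_mem_pvChars_len attr a ((pv_mem_pvNonComma attr a).mp ha).1
    have hlen : 2 ≤ attr.toList.length := by
      rw [PySem.Str.len_eq] at h2; exact_mod_cast h2
    rw [hb] at hca
    omega
  · simp

def BInv (init : List String) (fds : List (List String)) (P : List String)
    (st : PySem.Set String × List String × List Int) : Prop :=
  st.1.Nodup ∧ st.2.1.Nodup ∧
  (∀ x, x ∈ st.1 ↔ (x ∈ P ∨ x ∈ st.2.1)) ∧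
  (∀ x ∈ P, x ∉ st.2.1) ∧
  (∀ x ∈ st.1, InCl init fds x ∧ x.toList.length ≤ 1) ∧
  st.2.2.length = fds.length ∧
  (∀ j : Nat, j < fds.length →
    PySem.List.pyGetD st.2.2 (j : Int) 0 = cvalP (fds.map premB) P (j : Int)) ∧
  (∀ j : Nat, (hj : j < fds.length) → ∀ p, premB (fds[j]'hj) = some p →
    (∀ y ∈ p, y ∈ P) → ∀ z ∈ addB (fds[j]'hj), z ∈ st.1)

theorem altLoop_spec (init : List String) (fds : List (List String)) :
    ∀ (st : PySem.Set String × List String × List Int), ∀ (P : List String),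
      BInv init fds P st →
      (∀ x ∈ st.1, x ∈ altLoop (fds.map premB) (fds.map addB) fds.length st) ∧
      (altLoop (fds.map premB) (fds.map addB) fds.length st).Nodup ∧
      (∀ x ∈ altLoop (fds.map premB) (fds.map addB) fds.length st,
        InCl init fds x ∧ x.toList.length ≤ 1) ∧
      (∀ j : Nat, (hj : j < fds.length) → ∀ p, premB fds[j] = some p →
        (∀ y ∈ p, y ∈ altLoop (fds.map premB) (fds.map addB) fds.length st) →
        ∀ z ∈ addB fds[j], z ∈ altLoop (fds.map premB) (fds.map addB) fds.length st) := by
  intro st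
  induction st using altLoop.induct (prem := fds.map premB) (add := fds.map addB)
      (n := fds.length) with
  | case1 st hm =>
    intro P hInv
    obtain ⟨hnd1, hnd2, hmem, hdisj, hsound, hlen, hcnt, hfired⟩ := hInv
    have hL : altLoop (fds.map premB) (fds.map addB) fds.length st = st.1 := by
      rw [altLoop, hm]
    rw [hL]
    have hPiff : ∀ x, x ∈ st.1 ↔ x ∈ P := by
      intro x
      rw [hmem x, hm]
      simp
    refine ⟨fun x hx => hx, hnd1, hsound, ?_⟩
    intro j hj p hp hsub z hz
    exact hfired j hj p hp (fun y hy => (hPiff y).mp (hsub y hy)) z hz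
  | case2 st x rest hm ih =>
    intro P hInv
    obtain ⟨hnd1, hnd2, hmem, hdisj, hsound, hlen, hcnt, hfired⟩ := hInv
    rw [hm] at hnd2 hmem hdisj
    have hxres : x ∈ st.1 := (hmem x).mpr (Or.inr (by simp))
    have hxP : x ∉ P := fun hc => (hdisj x hc) (by simp)
    have hL : altLoop (fds.map premB) (fds.map addB) fds.length st =
        altLoop (fds.map premB) (fds.map addB) fds.length
          (altInner (fds.map premB) (fds.map addB) fds.length x (st.1, rest, st.2.2)) := by
      conv_lhs => rw [altLoop, hm]
    -- apply the fold specification over the full index range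
    have hjsnd : (PySem.List.pyRange 0 (fds.length : Int) 1).Nodup :=
      PySem.List.nodup_pyRange_one 0 (fds.length : Int)
    have hjpos : ∀ j ∈ PySem.List.pyRange 0 (fds.length : Int) 1, (0:Int) ≤ j :=
      fun j hj => (PySem.List.mem_pyRange_one.mp hj).1
    have hjlt : ∀ j ∈ PySem.List.pyRange 0 (fds.length : Int) 1, j < (st.2.2.length : Int) := by
      intro j hj
      rw [hlen]
      exact (PySem.List.mem_pyRange_one.mp hj).2
    have hjcnt : ∀ j ∈ PySem.List.pyRange 0 (fds.length : Int) 1,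
        PySem.List.pyGetD st.2.2 j 0 = cvalP (fds.map premB) P j := by
      intro j hj
      obtain ⟨k, hk, rfl⟩ := pv_int_cases fds.length j (hjpos j hj)
        (PySem.List.mem_pyRange_one.mp hj).2
      exact hcnt k hk
    obtain ⟨news, h1, h2, h3, h4, h5, h6⟩ := altTickFold_spec (fds.map premB) (fds.map addB)
      x P hxP (prem_table_nodup fds) (PySem.List.pyRange 0 (fds.length : Int) 1) hjsnd hjpos
      st.1 rest st.2.2 hjlt hjcnt
    obtain ⟨news0, s1, s2, snd0, snew0⟩ := altTickFold_shape (fds.map premB) (fds.map addB)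
      x (PySem.List.pyRange 0 (fds.length : Int) 1) st.1 rest st.2.2
    have hne : news0 = news := by
      have := s1.symm.trans h1
      exact List.append_cancel_left this
    subst hne
    -- the inner state
    have hinner1 : (altInner (fds.map premB) (fds.map addB) fds.length x
        (st.1, rest, st.2.2)).1 = st.1 ++ news0 := h1
    have hinner2 : (altInner (fds.map premB) (fds.map addB) fds.length x
        (st.1, rest, st.2.2)).2.1 = rest ++ news0 := h2
    have hrestres : ∀ z ∈ rest, z ∈ st.1 := fun z hz => (hmem z).mpr (Or.inr (by simp [hz]))
    have hPres : ∀ z ∈ P, z ∈ st.1 := fun z hz => (hmem z).mpr (Or.inl hz)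
    have hPxres : ∀ z ∈ P ++ [x], z ∈ st.1 := by
      intro z hz
      rcases List.mem_append.mp hz with hz1 | hz1
      · exact hPres z hz1
      · simp only [List.mem_singleton] at hz1
        subst hz1
        exact hxres
    have hInv' : BInv init fds (P ++ [x]) (altInner (fds.map premB) (fds.map addB)
        fds.length x (st.1, rest, st.2.2)) := by
      refine ⟨?_, ?_, ?_, ?_, ?_, ?_, ?_, ?_⟩
      · rw [hinner1]
        exact List.Nodup.append hnd1 snd0 (fun a ha hb => (snew0 a hb).1 ha)
      · rw [hinner2]
        exact List.Nodup.append (List.nodup_cons.mp hnd2).2 snd0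
          (fun a ha hb => (snew0 a hb).1 (hrestres a ha))
      · intro z
        rw [hinner1, hinner2]
        have hb := hmem z
        simp only [List.mem_append, List.mem_cons] at *
        tauto
      · intro z hz
        rw [hinner2]
        intro hcon
        rcases List.mem_append.mp hcon with hz1 | hz1
        · rcases List.mem_append.mp hz with hz2 | hz2
          · exact (hdisj z hz2) (by simp [hz1])
          · simp only [List.mem_singleton] at hz2
            subst hz2
            exact (List.nodup_cons.mp hnd2).1 hz1
        · exact (snew0 z hz1).1 (hPxres z hz)
      · intro z hz
        rw [hinner1] at hz
        rcases List.mem_append.mp hz with hz1 | hz1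
        · exact hsound z hz1
        · obtain ⟨j, hjjs, p, hp, hxp, hsub, hyadd⟩ := h5 z hz1
          obtain ⟨k, hk, rfl⟩ := pv_int_cases fds.length j (hjpos j hjjs)
            (PySem.List.mem_pyRange_one.mp hjjs).2
          rw [prem_table fds k hk] at hp
          rw [add_table fds k hk] at hyadd
          have hzadd := (mem_addB fds[k] (by rw [hp]; exact (by simp)) z).mp hyadd
          refine ⟨InCl.step (List.getElem_mem hk) hp ?_ hzadd.1, hzadd.2⟩
          intro y hy
          exact (hsound y (hPxres y (hsub y hy))).1
      · have hc3 : (altInner (fds.map premB) (fds.map addB) fds.length x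
            (st.1, rest, st.2.2)).2.2.length = st.2.2.length := h3
        rw [hc3]
        exact hlen
      · intro k hk
        have h0k : (0:Int) ≤ (k : Int) := by exact_mod_cast Nat.zero_le k
        have hc4 : PySem.List.pyGetD (altInner (fds.map premB) (fds.map addB) fds.length x
            (st.1, rest, st.2.2)).2.2 (k : Int) 0 =
            (if (k : Int) ∈ PySem.List.pyRange 0 (fds.length : Int) 1 ∧
                pMatchB (fds.map premB) (k : Int) x = true
             then PySem.List.pyGetD st.2.2 (k : Int) 0 - 1
             else PySem.List.pyGetD st.2.2 (k : Int) 0) := h4 (k : Int) h0k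
        rw [hc4]
        have hkjs : (k : Int) ∈ PySem.List.pyRange 0 (fds.length : Int) 1 := by
          rw [PySem.List.mem_pyRange_one]
          exact ⟨h0k, by exact_mod_cast hk⟩
        rcases hpm : PySem.List.pyGetD (fds.map premB) (k : Int) none with _ | p
        · have hfalse : pMatchB (fds.map premB) (k : Int) x = false := by
            simp [pMatchB, hpm]
          rw [if_neg (fun hcon => by rw [hfalse] at hcon; exact absurd hcon.2 (by simp))]
          rw [hcnt k hk]
          simp [cvalP, hpm]
        · have hpnd : p.Nodup := prem_table_nodup fds (k : Int) p hpm
          by_cases hxp : x ∈ p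
          · have htrue : pMatchB (fds.map premB) (k : Int) x = true := by
              simp [pMatchB, hpm, List.contains_eq_mem, hxp]
            rw [if_pos ⟨hkjs, htrue⟩, hcnt k hk]
            simp only [cvalP, hpm]
            have := pv_filter_decr p P x hpnd hxp hxP
            omega
          · have hfalse : pMatchB (fds.map premB) (k : Int) x = false := by
              simp [pMatchB, hpm, List.contains_eq_mem, hxp]
            rw [if_neg (fun hcon => by rw [hfalse] at hcon; exact absurd hcon.2 (by simp))]
            rw [hcnt k hk]
            simp only [cvalP, hpm]
            rw [pv_filter_notmem_eq p P x hxp]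
      · intro k hk p hp hsubP z hz
        have h0k : (0:Int) ≤ (k : Int) := by exact_mod_cast Nat.zero_le k
        have hkjs : (k : Int) ∈ PySem.List.pyRange 0 (fds.length : Int) 1 := by
          rw [PySem.List.mem_pyRange_one]
          exact ⟨h0k, by exact_mod_cast hk⟩
        by_cases hxp : x ∈ p
        · have := h6 (k : Int) hkjs p (by rw [prem_table fds k hk]; exact hp) hxp hsubP z
            (by rw [add_table fds k hk]; exact hz)
          rw [hinner1]
          exact h1 ▸ this
        · have hsubP' : ∀ y ∈ p, y ∈ P := by
            intro y hy
            rcases List.mem_append.mp (hsubP y hy) with h1' | h1'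
            · exact h1'
            · simp only [List.mem_singleton] at h1'
              subst h1'
              exact absurd hy hxp
          rw [hinner1]
          exact List.mem_append_left _ (hfired k hk p hp hsubP' z hz)
    obtain ⟨ihsub, ihnd, ihsound, ihclosed⟩ := ih (P ++ [x]) hInv'
    rw [hL]
    refine ⟨?_, ihnd, ihsound, ihclosed⟩
    intro z hz
    refine ihsub z ?_
    rw [hinner1]
    exact List.mem_append_left _ hz


theorem altClosure_eq (attr : String) (fds : List (List String)) :
    altClosure attr fds =
      altLoop (fds.map premB) (fds.map addB) fds.length
        ((altInitFire (fds.map addB) (altCount (fds.map premB)) fds.length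
            (PySem.Set.ofList (altStart attr), altStart attr)).1,
         (altInitFire (fds.map addB) (altCount (fds.map premB)) fds.length
            (PySem.Set.ofList (altStart attr), altStart attr)).2,
         altCount (fds.map premB)) := by
  unfold altClosure
  rw [altBuild_eq]

theorem InCl_len_sub (init : List String) (fds : List (List String)) (S : List String)
    (hinit : ∀ x, x ∈ init → x.toList.length ≤ 1 → x ∈ S)
    (hcl : ∀ j : Nat, (hj : j < fds.length) → ∀ p, premB fds[j] = some p →
      (∀ y ∈ p, y ∈ S) → ∀ z ∈ addB fds[j], z ∈ S) :
    ∀ x, InCl init fds x → x.toList.length ≤ 1 → x ∈ S := by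
  intro x h
  induction h with
  | base hx => exact fun hl => hinit _ hx hl
  | @step fd p z hfd hp hall hz ih =>
    intro hl
    obtain ⟨j, hj, hfdj⟩ := List.mem_iff_getElem.mp hfd
    refine hcl j hj p (by rw [hfdj]; exact hp) ?_ z ?_
    · intro y hy
      refine ih y hy ?_
      have := premB_mem_len fd p hp y hy
      omega
    · rw [hfdj]
      exact (mem_addB fd (by rw [hp]; simp) z).mpr ⟨hz, hl⟩

theorem altClosure_char (attr : String) (fds : List (List String)) :
    (altClosure attr fds).Nodup ∧
    (∀ x, x ∈ altClosure attr fds ↔ InCl (gcInit attr) fds x ∧ x.toList.length ≤ 1) := by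
  have hsn := altStart_nodup attr
  have hof : PySem.Set.ofList (altStart attr) = altStart attr :=
    PySem.Set.ofList_eq_self_of_nodup _ hsn
  obtain ⟨news, hfold, hndn, hnew, hclosed⟩ := altIFTickFold (fds.map addB)
    (altCount (fds.map premB)) (PySem.List.pyRange 0 (fds.length : Int) 1)
    (altStart attr) (altStart attr)
  have hIF : altInitFire (fds.map addB) (altCount (fds.map premB)) fds.length
      (PySem.Set.ofList (altStart attr), altStart attr)
      = (altStart attr ++ news, altStart attr ++ news) := by
    show (PySem.List.pyRange 0 (fds.length : Int) 1).foldl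
      (altIFTick (fds.map addB) (altCount (fds.map premB)))
      (PySem.Set.ofList (altStart attr), altStart attr) = _
    rw [hof]
    exact hfold
  have hclosed' : ∀ j ∈ PySem.List.pyRange 0 (fds.length : Int) 1,
      PySem.List.pyGetD (altCount (fds.map premB)) j 0 = 0 →
      ∀ y ∈ PySem.List.pyGetD (fds.map addB) j [], y ∈ altStart attr ++ news := by
    intro j hj hc y hy
    have := hclosed j hj hc y hy
    rw [hfold] at this
    exact this
  have hcount0 : ∀ (k : Nat), k < fds.length →
      PySem.List.pyGetD (altCount (fds.map premB)) (k : Int) 0 =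
        cvalP (fds.map premB) [] (k : Int) :=
    fun k hk => altCount_getD _ k (by simpa using hk)
  have hzero : ∀ (k : Nat), (hk : k < fds.length) →
      (PySem.List.pyGetD (altCount (fds.map premB)) (k : Int) 0 = 0 ↔
        premB fds[k] = some []) := by
    intro k hk
    rw [hcount0 k hk]
    unfold cvalP
    rw [prem_table fds k hk]
    rcases hp : premB fds[k] with _ | p
    · simp
    · simp only [Option.some.injEq]
      constructor
      · intro h
        have hpl : p.length = 0 := by
          have : (p.filter (fun y => !(([] : List String).contains y))) = p := by simp
          rw [this] at h
          exact_mod_cast h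
        exact List.length_eq_zero_iff.mp hpl
      · intro h
        subst h
        simp
  have hInv : BInv (gcInit attr) fds []
      (altStart attr ++ news, altStart attr ++ news, altCount (fds.map premB)) := by
    have hstartmem : ∀ z ∈ altStart attr ++ news,
        InCl (gcInit attr) fds z ∧ z.toList.length ≤ 1 := by
      intro z hz
      rcases List.mem_append.mp hz with hz1 | hz1
      · have := (mem_altStart attr z).mp hz1
        exact ⟨InCl.base this.1, this.2⟩
      · obtain ⟨hznot, j, hjjs, hcj, hzadd⟩ := hnew z hz1
        obtain ⟨k, hk, rfl⟩ := pv_int_cases fds.length j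
          (PySem.List.mem_pyRange_one.mp hjjs).1 (PySem.List.mem_pyRange_one.mp hjjs).2
        have hp := (hzero k hk).mp hcj
        rw [add_table fds k hk] at hzadd
        have hza := (mem_addB fds[k] (by rw [hp]; simp) z).mp hzadd
        refine ⟨InCl.step (List.getElem_mem hk) hp (by simp) hza.1, hza.2⟩
    refine ⟨?_, ?_, ?_, ?_, hstartmem, ?_, ?_, ?_⟩
    · exact List.Nodup.append hsn hndn (fun a ha hb => (hnew a hb).1 ha)
    · exact List.Nodup.append hsn hndn (fun a ha hb => (hnew a hb).1 ha)
    · intro z; simp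
    · intro z hz; cases hz
    · simp [altCount_len]
    · intro k hk
      exact hcount0 k hk
    · intro k hk p hp hsub z hz
      have hpe : p = [] := by
        rcases p with _ | ⟨y, t⟩
        · rfl
        · exact absurd (hsub y (by simp)) (by simp)
      subst hpe
      have hcz : PySem.List.pyGetD (altCount (fds.map premB)) (k : Int) 0 = 0 :=
        (hzero k hk).mpr hp
      have hkjs : (k : Int) ∈ PySem.List.pyRange 0 (fds.length : Int) 1 := by
        rw [PySem.List.mem_pyRange_one]
        exact ⟨by exact_mod_cast Nat.zero_le k, by exact_mod_cast hk⟩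
      exact hclosed' (k : Int) hkjs hcz z (by rw [add_table fds k hk]; exact hz)
  obtain ⟨hsub, hndS, hsoundS, hclosedS⟩ := altLoop_spec (gcInit attr) fds
    (altStart attr ++ news, altStart attr ++ news, altCount (fds.map premB)) [] hInv
  have hAC : altClosure attr fds = altLoop (fds.map premB) (fds.map addB) fds.length
      (altStart attr ++ news, altStart attr ++ news, altCount (fds.map premB)) := by
    rw [altClosure_eq, hIF]
  rw [hAC]
  refine ⟨hndS, ?_⟩
  intro x
  constructor
  · exact hsoundS x
  · intro ⟨h1, h2⟩
    refine InCl_len_sub (gcInit attr) fds _ ?_ hclosedS x h1 h2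
    intro z hz1 hz2
    exact hsub z (List.mem_append_left _ ((mem_altStart attr z).mpr ⟨hz1, hz2⟩))

theorem closure_verdict (a : String) (f1 f2 : List (List String))
    (hnd : (pvNonComma a).Nodup) :
    (decide (get_closure a f2 = get_closure a f1)) =
      PySem.Set.equal (altClosure a f2) (altClosure a f1) := by
  have hA : ∀ f : List (List String), ∀ x : String,
      (x ∈ (gcLoop f (gcInit a)).filter (fun x => !(decide (1 < PySem.Str.len x)))) ↔
      (InCl (gcInit a) f x ∧ x.toList.length ≤ 1) := by
    intro f x
    rw [List.mem_filter, mem_gcLoop]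
    constructor
    · rintro ⟨h1, h2⟩
      refine ⟨h1, ?_⟩
      simp only [PySem.Str.len_eq, Bool.not_eq_true', decide_eq_false_iff_not] at h2
      omega
    · rintro ⟨h1, h2⟩
      refine ⟨h1, ?_⟩
      simp only [PySem.Str.len_eq, Bool.not_eq_true', decide_eq_false_iff_not]
      omega
  have hAnd : ∀ f : List (List String),
      ((gcLoop f (gcInit a)).filter (fun x => !(decide (1 < PySem.Str.len x)))).Nodup :=
    fun f => (gcLoop_nodup f (gcInit a) (gcInit_nodup a hnd)).filter _
  have hB2 := altClosure_char a f2
  have hB1 := altClosure_char a f1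
  have key : (get_closure a f2 = get_closure a f1) ↔
      (PySem.Set.equal (altClosure a f2) (altClosure a f1) = true) := by
    unfold get_closure
    rw [PySem.List.sorted_id_eq_sorted_id_iff_perm]
    rw [List.perm_ext_iff_of_nodup (hAnd f2) (hAnd f1)]
    rw [PySem.Set.equal_iff]
    constructor
    · intro h x
      rw [hB2.2 x, hB1.2 x, ← hA f2 x, ← hA f1 x]
      exact h x
    · intro h x
      rw [hA f2 x, hA f1 x, ← hB2.2 x, ← hB1.2 x]
      exact h x
  cases hb : PySem.Set.equal (altClosure a f2) (altClosure a f1)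
  · refine decide_eq_false ?_
    intro hc
    rw [key, hb] at hc
    cases hc
  · exact decide_eq_true (key.mpr hb)

theorem altGo_eq_all (f1 f2 : List (List String)) :
    ∀ rem, altGo f1 f2 rem = rem.all (fun fd => f2.contains fd ||
      PySem.Set.equal (altClosure (PySem.List.pyGetD fd 0 "") f2)
        (altClosure (PySem.List.pyGetD fd 0 "") f1)) := by
  intro rem
  induction rem with
  | nil => rfl
  | cons fd rest ih =>
    by_cases h1 : fd ∈ f2
    · simp [altGo, List.contains_eq_mem, h1, ih]
    · by_cases h2 : PySem.Set.equal (altClosure (PySem.List.pyGetD fd 0 "") f2)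
          (altClosure (PySem.List.pyGetD fd 0 "") f1) = true
      · simp [altGo, List.contains_eq_mem, h1, h2, ih]
      · simp [altGo, List.contains_eq_mem, h1, h2]

theorem fd1infd2_eq_filter (f1 f2 : List (List String)) :
    fd1infd2 f1 f2 = decide (f1.filter (fun fd => f2.contains fd ||
      decide (get_closure (PySem.List.pyGetD fd 0 "") f2 =
        get_closure (PySem.List.pyGetD fd 0 "") f1)) = f1) := by
  unfold fd1infd2
  have hfun : (fun (acc : List (List String)) fd =>
      if f2.contains fd then acc ++ [fd]
      else if get_closure (PySem.List.pyGetD fd 0 "") f2 =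
          get_closure (PySem.List.pyGetD fd 0 "") f1 then acc ++ [fd]
      else acc)
      = fun (acc : List (List String)) fd =>
        if (f2.contains fd || decide (get_closure (PySem.List.pyGetD fd 0 "") f2 =
            get_closure (PySem.List.pyGetD fd 0 "") f1)) = true
        then acc ++ [(fun y => y) fd] else acc := by
    funext acc fd
    by_cases h1 : fd ∈ f2
    · simp [List.contains_eq_mem, h1]
    · by_cases h2 : get_closure (PySem.List.pyGetD fd 0 "") f2 =
          get_closure (PySem.List.pyGetD fd 0 "") f1
      · simp [List.contains_eq_mem, h1, h2]
      · simp [List.contains_eq_mem, h1, h2]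
  rw [hfun, PySem.List.foldl_append_if]
  simp

theorem fd1infd2_agree (f1 f2 : List (List String))
    (h : ∀ fd ∈ f1, fd ∈ f2 ∨ (pvNonComma (fd.getD 0 "")).Nodup) :
    fd1infd2 f1 f2 = fd1infd2_alt f1 f2 := by
  rw [fd1infd2_eq_filter]
  show _ = altGo f1 f2 f1
  rw [altGo_eq_all f1 f2 f1]
  have hpt : ∀ fd ∈ f1,
      (f2.contains fd || decide (get_closure (PySem.List.pyGetD fd 0 "") f2 =
        get_closure (PySem.List.pyGetD fd 0 "") f1))
      = (f2.contains fd || PySem.Set.equal (altClosure (PySem.List.pyGetD fd 0 "") f2)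
          (altClosure (PySem.List.pyGetD fd 0 "") f1)) := by
    intro fd hfd
    rcases h fd hfd with h1 | h1
    · simp [List.contains_eq_mem, h1]
    · have hnd : (pvNonComma (PySem.List.pyGetD fd 0 "")).Nodup := by
        rw [PySem.List.pyGetD_zero]
        exact h1
      rw [closure_verdict (PySem.List.pyGetD fd 0 "") f1 f2 hnd]
  rw [List.filter_congr hpt]
  cases hall : f1.all (fun fd => f2.contains fd ||
      PySem.Set.equal (altClosure (PySem.List.pyGetD fd 0 "") f2)
        (altClosure (PySem.List.pyGetD fd 0 "") f1))
  · refine decide_eq_false ?_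
    intro hc
    rw [List.filter_eq_self] at hc
    rw [List.all_eq_true.mpr hc] at hall
    cases hall
  · exact decide_eq_true (List.filter_eq_self.mpr (List.all_eq_true.mp hall))

-- ===== VERDICT (by name: the statement is the Claim_ definition above) =====
theorem fd1infd2_spec : Claim_equal_fd1infd2 := by
  intro fd1_set fd2_set _ hpre
  unfold Spec_fd1infd2
  apply fd1infd2_agree
  intro fd hfd
  rcases hpre with h | ⟨h1, _⟩
  · exact Or.inl (h fd hfd)
  · exact Or.inr (h1 fd hfd).2
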